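-- pv_equiv track=rewrite | github.com/Uks130322/yandex_algs_5.0 | algs_5_3/task_C/task_C.py | delete_nums
-- ===== SOURCE A (Python) =====
-- def delete_nums(nums: list[int]) -> int:
--     nums_dict = dict()
--     for num in nums:
--         nums_dict[num] = nums_dict.get(num, 0) + 1
--     result_dict = dict()
--     for key in nums_dict.keys():
--         if key + 1 in nums_dict.keys():
--             result_dict[key] = nums_dict[key] + nums_dict[key + 1]
--         elif key not in result_dict.keys():
--             result_dict[key] = nums_dict[key]
--     return len(nums) - max(result_dict.values())
-- ===== SOURCE B (Python) =====
-- def delete_nums(nums: list[int]) -> int: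
--     s = sorted(nums)
--     n = len(s)
--     best = 0
--     l = 0
--     r = 0
--     while r < n:
--         while s[r] - s[l] > 1:
--             l += 1
--         cand = r - l + 1
--         if cand > best:
--             best = cand
--         r += 1
--     return n - best
-- ===== Notes on version B (the rewrite author's own statement) =====
-- stated objective: alternative
-- what changed: A builds a frequency dict and takes the max of count[v]+count[v+1] over hash probes; B never counts anything: it sorts the whole list and runs a two-pointer sliding window over the sorted multiset, keeping the longest window whose endpoints differ by at most 1, and returns n minus that window length.
import Mathlib
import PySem

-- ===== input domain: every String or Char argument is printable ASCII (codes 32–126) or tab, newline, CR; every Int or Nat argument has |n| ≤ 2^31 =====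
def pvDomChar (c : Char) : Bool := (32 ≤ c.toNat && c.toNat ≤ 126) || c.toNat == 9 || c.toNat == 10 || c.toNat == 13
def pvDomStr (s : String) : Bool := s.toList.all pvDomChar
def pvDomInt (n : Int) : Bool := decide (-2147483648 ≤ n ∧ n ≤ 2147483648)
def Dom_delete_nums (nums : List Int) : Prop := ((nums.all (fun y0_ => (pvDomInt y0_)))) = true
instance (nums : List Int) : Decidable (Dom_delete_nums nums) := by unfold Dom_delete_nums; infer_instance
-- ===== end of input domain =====

-- B drops A's frequency dict entirely: it sorts the list and finds, by a two-pointer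
-- sliding window over the sorted multiset, the longest window whose endpoints differ
-- by at most 1 (objective: an alternative algorithm).

-- ===== PORT A =====
-- A's second loop: for key in nums_dict.keys(): if key+1 in nums_dict: result[key] = c[key]+c[key+1]
-- elif key not in result: result[key] = c[key]
def aLoop (nd : PySem.Dict Int Int) (keys : List Int) : PySem.Dict Int Int :=
  keys.foldl
    (fun acc key =>
      if nd.contains (key + 1) then
        acc.insert key (nd.getD key 0 + nd.getD (key + 1) 0)
      else if acc.contains key = false then
        acc.insert key (nd.getD key 0)
      else acc)
    PySem.Dict.empty

def delete_nums (nums : List Int) : Int :=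
  let nums_dict : PySem.Dict Int Int :=
    nums.foldl (fun d num => d.insert num (d.getD num 0 + 1)) PySem.Dict.empty
  let result_dict := aLoop nums_dict nums_dict.keys
  -- max(result_dict.values()): none only on the empty dict, i.e. nums = [], excluded by Pre_
  (nums.length : Int) - (PySem.List.max? result_dict.values (fun v => v)).getD 0

-- ===== PORT B =====
-- inner 'while s[r] - s[l] > 1: l += 1'.  Python's s[l] is always in range here
-- (l never passes r, and the caller has r < len(s)); the out-of-range branch is unreachable.
def bWhile (s : List Int) (vr : Int) (l : Nat) : Nat :=
  if h : l < s.length then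
    if vr - s[l] > 1 then bWhile s vr (l + 1) else l
  else l
termination_by s.length - l

-- outer 'while r < n: …; cand = r - l + 1; if cand > best: best = cand; r += 1'
def bOuter (s : List Int) (r l : Nat) (best : Int) : Int :=
  if h : r < s.length then
    let l' := bWhile s s[r] l
    let cand := (r : Int) - (l' : Int) + 1
    bOuter s (r + 1) l' (if cand > best then cand else best)
  else best
termination_by s.length - r

def delete_nums_alt (nums : List Int) : Int :=
  let s := PySem.List.sorted nums (fun x => x) false
  (s.length : Int) - bOuter s 0 0 0

-- ===== PRECONDITION & SPEC =====
-- A raises ValueError (max of an empty sequence) on the empty list; Pre_ excludes exactly that.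
def Pre_delete_nums (nums : List Int) : Prop := nums ≠ []
instance (nums : List Int) : Decidable (Pre_delete_nums nums) := by unfold Pre_delete_nums; infer_instance
def pvWitness_delete_nums : List Int := [1, 2, 2, 5]

def Spec_delete_nums (nums : List Int) (out : Int) : Prop := out = delete_nums_alt nums
instance (nums : List Int) (out : Int) : Decidable (Spec_delete_nums nums out) := by unfold Spec_delete_nums; infer_instance

-- ===== CLAIM (what is proved, stated in full; the proofs are below) =====
def Claim_equal_delete_nums : Prop := ∀ (nums : List Int), Dom_delete_nums nums → Pre_delete_nums nums → Spec_delete_nums nums (delete_nums nums)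

-- ===== LEMMAS AND PROOFS =====

-- the per-key candidate A records in result_dict
def candF (nd : PySem.Dict Int Int) (k : Int) : Int :=
  nd.getD k 0 + (if nd.contains (k + 1) then nd.getD (k + 1) 0 else 0)

-- A's branchy loop over fresh distinct keys is a plain insert loop of candF
theorem aLoop_eq_insert (nd : PySem.Dict Int Int) :
    ∀ (l : List Int) (acc : PySem.Dict Int Int), l.Nodup →
      (∀ k ∈ l, acc.contains k = false) →
      (l.foldl
        (fun acc key =>
          if nd.contains (key + 1) then
            acc.insert key (nd.getD key 0 + nd.getD (key + 1) 0)
          else if acc.contains key = false then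
            acc.insert key (nd.getD key 0)
          else acc)
        acc) = l.foldl (fun d k => d.insert k (candF nd k)) acc := by
  intro l
  induction l with
  | nil => intro acc _ _; rfl
  | cons k t ih =>
    intro acc hnd hfresh
    simp only [List.foldl_cons]
    have hk : acc.contains k = false := hfresh k (by simp)
    have hstep :
        (if nd.contains (k + 1) then
          acc.insert k (nd.getD k 0 + nd.getD (k + 1) 0)
         else if acc.contains k = false then
          acc.insert k (nd.getD k 0)
         else acc) = acc.insert k (candF nd k) := by
      unfold candF
      by_cases h : nd.contains (k + 1) <;> simp [h, hk]
    rw [hstep]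
    refine ih _ (List.Nodup.of_cons hnd) ?_
    intro k' hk'
    have hne : k' ≠ k := by
      rintro rfl; exact (List.nodup_cons.mp hnd).1 hk'
    rw [PySem.Dict.contains_insert]
    simp [hne, hfresh k' (List.mem_cons_of_mem _ hk')]

-- values of result_dict = candF mapped over the distinct values of nums
theorem aLoop_values (nums : List Int) :
    (aLoop (PySem.Dict.counter nums) (PySem.Dict.counter nums).keys).values
      = (PySem.Set.ofList nums).map (candF (PySem.Dict.counter nums)) := by
  unfold aLoop
  rw [aLoop_eq_insert (PySem.Dict.counter nums) _ PySem.Dict.empty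
        (by rw [PySem.Dict.keys_counter]; exact PySem.Set.nodup_ofList nums)
        (by intro k _; simp [PySem.Dict.contains_empty])]
  rw [PySem.Dict.keys_counter]
  have h := PySem.Dict.items_foldl_insert_fresh (d := (PySem.Dict.empty : PySem.Dict Int Int))
      (l := PySem.Set.ofList nums) (k := fun x => x) (v := candF (PySem.Dict.counter nums))
      (by intro a _; simp [PySem.Dict.contains_empty])
      (by simp [PySem.Set.nodup_ofList nums])
  simp only [PySem.Dict.values, h]
  simp [PySem.Dict.empty]

-- candF over the counter is count(k) + count(k+1)
theorem candF_count (nums : List Int) (k : Int) :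
    candF (PySem.Dict.counter nums) k = (nums.count k : Int) + (nums.count (k + 1) : Int) := by
  unfold candF
  rw [PySem.Dict.getD_counter, PySem.Dict.getD_counter]
  by_cases h : (PySem.Dict.counter nums).contains (k + 1) = true
  · simp [h]
  · have hm : k + 1 ∉ nums := by
      rw [PySem.Dict.contains_counter] at h; simpa using h
    simp [h, List.count_eq_zero_of_not_mem hm]

-- every candidate is nonnegative
theorem candF_nonneg (nums : List Int) (k : Int) :
    0 ≤ candF (PySem.Dict.counter nums) k := by
  rw [candF_count]; positivity

-- ----- foldl max toolkit -----
theorem le_foldl_max_self (l : List Int) (b : Int) : b ≤ l.foldl max b := by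
  induction l generalizing b with
  | nil => simp
  | cons x t ih => exact le_trans (le_max_left b x) (ih (max b x))

theorem mem_le_foldl_max (l : List Int) : ∀ (b x : Int), x ∈ l → x ≤ l.foldl max b := by
  induction l with
  | nil => intro b x hx; simp at hx
  | cons y t ih =>
    intro b x hx
    rcases List.mem_cons.mp hx with rfl | h
    · exact le_trans (le_max_right b x) (le_foldl_max_self t (max b x))
    · exact ih (max b y) x h

theorem foldl_max_le (l : List Int) (b c : Int) (hb : b ≤ c) (h : ∀ x ∈ l, x ≤ c) :
    l.foldl max b ≤ c := by
  induction l generalizing b with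
  | nil => simpa
  | cons y t ih =>
    simp only [List.foldl_cons]
    exact ih (max b y) (max_le hb (h y (by simp))) (fun x hx => h x (List.mem_cons_of_mem _ hx))

-- ----- sorted / countP toolkit -----
theorem sorted_getElem_mono (s : List Int) (hs : s.Pairwise (· ≤ ·)) (i j : Nat)
    (hij : i ≤ j) (hj : j < s.length) : s[i]'(lt_of_le_of_lt hij hj) ≤ s[j] := by
  rcases Nat.lt_or_ge i j with h | h
  · exact (List.pairwise_iff_getElem.mp hs) i j _ hj h
  · have : i = j := le_antisymm hij h
    subst this; exact le_refl _

theorem sorted_countP (p : Int → Bool) (hp : ∀ x y : Int, y ≤ x → p x = true → p y = true) :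
    ∀ (s : List Int), s.Pairwise (· ≤ ·) → ∀ (i : Nat) (hi : i < s.length),
      (p (s[i]'hi) = true ↔ i < s.countP p) := by
  intro s
  induction s with
  | nil => intro _ i hi; simp at hi
  | cons a t ih =>
    intro hpw i hi
    have ha : ∀ x ∈ t, a ≤ x := (List.pairwise_cons.mp hpw).1
    have hpt := (List.pairwise_cons.mp hpw).2
    rw [List.countP_cons]
    by_cases hpa : p a = true
    · cases i with
      | zero => simp [hpa]
      | succ j =>
        have hj : j < t.length := by simpa using hi
        have hiff := ih hpt j hj
        simp only [List.getElem_cons_succ]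
        rw [hiff]
        simp only [hpa, if_true]
        omega
    · have ht0 : t.countP p = 0 := by
        rw [List.countP_eq_zero]
        intro x hx hxp
        exact hpa (hp x a (ha x hx) hxp)
      cases i with
      | zero => simp [hpa, ht0]
      | succ j =>
        have hj : j < t.length := by simpa using hi
        have hfj : ¬ p (t[j]'hj) = true :=
          fun h => (List.countP_eq_zero.mp ht0) _ (List.getElem_mem hj) h
        simp [hfj, ht0, hpa]

theorem countP_le_split (s : List Int) (v : Int) :
    s.countP (fun x => decide (x ≤ v)) = s.countP (fun x => decide (x < v)) + s.count v := by
  induction s with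
  | nil => simp
  | cons a t ih =>
    rw [List.countP_cons, List.countP_cons, List.count_cons, ih]
    split_ifs with h1 h2 h3 h4 h5 <;> simp only [decide_eq_true_eq, beq_iff_eq] at * <;> omega

theorem countP_lt_split (s : List Int) (v : Int) :
    s.countP (fun x => decide (x < v)) = s.countP (fun x => decide (x < v - 1)) + s.count (v - 1) := by
  induction s with
  | nil => simp
  | cons a t ih =>
    rw [List.countP_cons, List.countP_cons, List.count_cons, ih]
    split_ifs with h1 h2 h3 h4 h5 <;> simp only [decide_eq_true_eq, beq_iff_eq] at * <;> omega

-- ----- B's loops -----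
theorem bWhile_eq_of (s : List Int) (v : Int) :
    ∀ (d l0 x : Nat) (hx : x < s.length), l0 ≤ x → x - l0 ≤ d → ¬ v - s[x] > 1 →
      (∀ (l : Nat) (hl : l < s.length), l0 ≤ l → l < x → v - s[l] > 1) →
    bWhile s v l0 = x := by
  intro d
  induction d with
  | zero =>
    intro l0 x hx h0 hd hfalse _
    have he : l0 = x := by omega
    subst he
    rw [bWhile.eq_def, dif_pos hx, if_neg hfalse]
  | succ d ih =>
    intro l0 x hx h0 hd hfalse htrue
    by_cases he : l0 = x
    · subst he
      rw [bWhile.eq_def, dif_pos hx, if_neg hfalse]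
    · have hlt : l0 < x := by omega
      have hl0 : l0 < s.length := lt_trans hlt hx
      rw [bWhile.eq_def, dif_pos hl0, if_pos (htrue l0 hl0 le_rfl hlt)]
      exact ih (l0 + 1) x hx (by omega) (by omega) hfalse
        (fun l hl h1 h2 => htrue l hl (by omega) h2)

-- left target of the window whose right value is t
def Lp (s : List Int) (t : Int) : Nat := s.countP (fun x => decide (x < t - 1))

-- window length (as recorded by B) for right index i
def W (s : List Int) (i : Nat) : Int := (i : Int) - (Lp s (s.getD i 0) : Int) + 1

theorem Lp_le_self (s : List Int) (hs : s.Pairwise (· ≤ ·)) (r : Nat) (hr : r < s.length) :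
    Lp s s[r] ≤ r := by
  have h := sorted_countP (fun x => decide (x < s[r] - 1))
      (fun x y hyx hx => by simp only [decide_eq_true_eq] at *; omega) s hs r hr
  by_contra hc
  unfold Lp at hc
  have := h.mpr (by omega)
  simp only [decide_eq_true_eq] at this
  omega

theorem bWhile_eq_Lp (s : List Int) (hs : s.Pairwise (· ≤ ·)) (r : Nat) (hr : r < s.length)
    (l0 : Nat) (hl0 : l0 ≤ Lp s s[r]) : bWhile s s[r] l0 = Lp s s[r] := by
  have hiff := sorted_countP (fun x => decide (x < s[r] - 1))
      (fun x y hyx hx => by simp only [decide_eq_true_eq] at *; omega) s hs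
  have hLr : Lp s s[r] ≤ r := Lp_le_self s hs r hr
  have hLn : Lp s s[r] < s.length := lt_of_le_of_lt hLr hr
  refine bWhile_eq_of s s[r] (Lp s s[r]) l0 (Lp s s[r]) hLn hl0 (by omega) ?_ ?_
  · -- the element at the left target is not more than 1 below s[r]
    intro hgt
    have := (hiff (Lp s s[r]) hLn).mp (by simp only [decide_eq_true_eq]; omega)
    exact absurd this (by unfold Lp; omega)
  · intro l hl h1 h2
    have := (hiff l hl).mpr (by unfold Lp at h2; omega)
    simp only [decide_eq_true_eq] at this
    omega

theorem bOuter_eq (s : List Int) (hs : s.Pairwise (· ≤ ·)) :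
    ∀ (k r l0 : Nat) (b : Int), s.length - r ≤ k → (∀ h : r < s.length, l0 ≤ Lp s s[r]) →
      bOuter s r l0 b = ((List.range s.length).drop r).foldl (fun acc i => max acc (W s i)) b := by
  intro k
  induction k with
  | zero =>
    intro r l0 b hk _
    have hr : s.length ≤ r := by omega
    rw [bOuter.eq_def, dif_neg (by omega),
        List.drop_of_length_le (by simpa using hr)]
    rfl
  | succ k ih =>
    intro r l0 b hk hl0
    by_cases h : r < s.length
    · rw [bOuter.eq_def, dif_pos h]
      simp only []
      rw [bWhile_eq_Lp s hs r h l0 (hl0 h)]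
      have hrr : r < (List.range s.length).length := by simpa using h
      rw [List.drop_eq_getElem_cons hrr]
      simp only [List.getElem_range, List.foldl_cons]
      have hW : W s r = (r : Int) - (Lp s s[r] : Int) + 1 := by
        unfold W
        rw [List.getD_eq_getElem s 0 h]
      have hmax : (if (r : Int) - (Lp s s[r] : Int) + 1 > b then (r : Int) - (Lp s s[r] : Int) + 1 else b)
          = max b (W s r) := by
        rw [hW, max_def]; split_ifs <;> omega
      rw [hmax]
      refine ih (r + 1) (Lp s s[r]) (max b (W s r)) (by omega) ?_
      intro h'
      unfold Lp
      refine List.countP_mono_left ?_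
      intro x _ hx
      simp only [decide_eq_true_eq] at *
      have hmono := sorted_getElem_mono s hs r (r + 1) (by omega) h'
      omega
    · rw [bOuter.eq_def, dif_neg h,
          List.drop_of_length_le (by simp; omega)]
      rfl

-- ===== VERDICT (by name: the statement is the Claim_ definition above) =====
theorem delete_nums_spec : Claim_equal_delete_nums := by
  intro nums _ hpre
  unfold Pre_delete_nums at hpre
  unfold Spec_delete_nums delete_nums delete_nums_alt
  simp only []
  rw [PySem.Dict.foldl_insert_getD_add_one_eq_counter]
  rw [aLoop_values]
  set C := PySem.Dict.counter nums with hC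
  set K := PySem.Set.ofList nums with hK
  set s := PySem.List.sorted nums (fun x => x) false with hS
  have hperm : s.Perm nums := PySem.List.sorted_perm _ _ _
  have hs : s.Pairwise (· ≤ ·) := PySem.List.sorted_pairwise nums (fun x => x)
  have hlen : s.length = nums.length := hperm.length_eq
  have hKne : K ≠ [] := by
    cases nums with
    | nil => exact absurd rfl hpre
    | cons x t => rw [hK, PySem.Set.ofList_cons]; simp
  -- common counting facts on the sorted list s
  have hcnt : ∀ v : Int, s.count v = nums.count v := fun v => hperm.count_eq v
  have hmem : ∀ v : Int, v ∈ s ↔ v ∈ nums := fun v => hperm.mem_iff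
  have hiffLe : ∀ (t : Int) (i : Nat) (hi : i < s.length),
      (s[i] ≤ t ↔ i < s.countP (fun x => decide (x ≤ t))) := by
    intro t i hi
    have := sorted_countP (fun x => decide (x ≤ t))
        (fun x y hyx hx => by simp only [decide_eq_true_eq] at *; omega) s hs i hi
    simpa using this
  have hsplit1 : ∀ t : Int, s.countP (fun x => decide (x ≤ t))
      = s.countP (fun x => decide (x < t)) + s.count t := countP_le_split s
  have hsplit2 : ∀ t : Int, s.countP (fun x => decide (x < t))
      = s.countP (fun x => decide (x < t - 1)) + s.count (t - 1) := countP_lt_split s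
  -- B's loop as a fold of window lengths
  have hB : bOuter s 0 0 0 = ((List.range s.length).map (W s)).foldl max 0 := by
    rw [bOuter_eq s hs s.length 0 0 0 (by omega) (fun h => Nat.zero_le _),
        List.drop_zero, List.foldl_map]
  -- the window length at right index r whose value is s[r] = v
  have hWval : ∀ (r : Nat) (hr : r < s.length),
      W s r = (r : Int) + 1 - (s.countP (fun x => decide (x < s[r] - 1)) : Int) := by
    intro r hr
    unfold W Lp
    rw [List.getD_eq_getElem s 0 hr]
    ring
  cases hKc : K with
  | nil => exact absurd hKc hKne
  | cons k0 K' =>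
    simp only [List.map_cons]
    rw [PySem.List.max?_id_cons]
    simp only [Option.getD_some]
    have h0 : (K'.map (candF C)).foldl max (candF C k0) = (K.map (candF C)).foldl max 0 := by
      rw [hKc, List.map_cons, List.foldl_cons]
      congr 1
      have hnn : 0 ≤ candF C k0 := by rw [hC]; exact candF_nonneg nums k0
      exact (max_eq_right hnn).symm
    rw [← hlen, h0, hB]
    -- both sides are running maxima from 0; compare element-wise
    congr 1
    apply le_antisymm
    · -- A's candidates are dominated by some window
      refine foldl_max_le _ 0 _ (le_foldl_max_self _ 0) ?_
      intro x hx
      obtain ⟨v, hvK, rfl⟩ := List.mem_map.mp hx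
      have hvnums : v ∈ nums := by
        rw [hK] at hvK; exact (PySem.Set.mem_ofList _ _).mp hvK
      have hcv : 1 ≤ s.count v := List.count_pos_iff.mpr ((hmem v).mpr hvnums)
      have hxval : candF C v = (s.count v : Int) + (s.count (v + 1) : Int) := by
        rw [hC, candF_count, hcnt, hcnt]
      by_cases hv1 : (v + 1) ∈ nums
      · -- r = last index of v+1; its window is exactly count v + count (v+1)
        have hc1 : 1 ≤ s.count (v + 1) := List.count_pos_iff.mpr ((hmem _).mpr hv1)
        set r := s.countP (fun x => decide (x ≤ v + 1)) - 1 with hr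
        have hlelen : s.countP (fun x => decide (x ≤ v + 1)) ≤ s.length :=
          List.countP_le_length
        have hsp1 := hsplit1 (v + 1)
        have hsp2 : s.countP (fun x => decide (x < v + 1))
            = s.countP (fun x => decide (x < v)) + s.count v := by
          have := hsplit2 (v + 1)
          simpa using this
        have hsp3 := hsplit1 v
        have hrlt : r < s.length := by omega
        have hub : s[r] ≤ v + 1 := (hiffLe (v + 1) r hrlt).mpr (by omega)
        have hlb : ¬ s[r] ≤ v := by
          intro h
          have := (hiffLe v r hrlt).mp h
          omega
        have hv : s[r] = v + 1 := by omega
        have hWr : W s r = (s.count v : Int) + (s.count (v + 1) : Int) := by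
          rw [hWval r hrlt, hv]
          have : (fun x : Int => decide (x < v + 1 - 1)) = (fun x : Int => decide (x < v)) := by
            funext x; simp only [add_sub_cancel_right]
          rw [this]
          omega
        refine le_trans (le_of_eq ?_) (mem_le_foldl_max _ 0 _
          (List.mem_map.mpr ⟨r, List.mem_range.mpr hrlt, rfl⟩))
        rw [hxval, hWr]
      · -- v+1 absent: r = last index of v; its window is count (v-1) + count v ≥ count v
        have hc1 : s.count (v + 1) = 0 :=
          List.count_eq_zero_of_not_mem (fun h => hv1 ((hmem _).mp h))
        set r := s.countP (fun x => decide (x ≤ v)) - 1 with hr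
        have hlelen : s.countP (fun x => decide (x ≤ v)) ≤ s.length :=
          List.countP_le_length
        have hsp1 := hsplit1 v
        have hsp2 := hsplit2 v
        have hrlt : r < s.length := by omega
        have hub : s[r] ≤ v := (hiffLe v r hrlt).mpr (by omega)
        have hlb : ¬ s[r] ≤ v - 1 := by
          intro h
          have := (hiffLe (v - 1) r hrlt).mp h
          have hq : s.countP (fun x => decide (x ≤ v - 1))
              = s.countP (fun x => decide (x < v)) := by
            apply List.countP_congr
            intro x _
            simp only [decide_eq_true_eq]
            omega
          omega
        have hv : s[r] = v := by omega
        have hWr : W s r = (s.count (v - 1) : Int) + (s.count v : Int) := by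
          rw [hWval r hrlt, hv]
          omega
        refine le_trans ?_ (mem_le_foldl_max _ 0 _
          (List.mem_map.mpr ⟨r, List.mem_range.mpr hrlt, rfl⟩))
        rw [hxval, hWr]
        have : (0 : Int) ≤ (s.count (v - 1) : Int) := by positivity
        omega
    · -- every window is dominated by one of A's candidates
      refine foldl_max_le _ 0 _ (le_foldl_max_self _ 0) ?_
      intro x hx
      obtain ⟨i, hir, rfl⟩ := List.mem_map.mp hx
      have hi : i < s.length := List.mem_range.mp hir
      set v := s[i] with hv
      have hile : i < s.countP (fun x => decide (x ≤ v)) := (hiffLe v i hi).mp le_rfl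
      have hsp1 := hsplit1 v
      have hsp2 := hsplit2 v
      have hWle : W s i ≤ (s.count (v - 1) : Int) + (s.count v : Int) := by
        rw [hWval i hi, ← hv]
        omega
      by_cases hvm : (v - 1) ∈ nums
      · have hkK : candF C (v - 1) ∈ K.map (candF C) :=
          List.mem_map.mpr ⟨v - 1, by rw [hK]; exact (PySem.Set.mem_ofList _ _).mpr hvm, rfl⟩
        have hcand : candF C (v - 1) = (s.count (v - 1) : Int) + (s.count v : Int) := by
          rw [hC, candF_count, hcnt, hcnt]
          norm_num
        refine le_trans ?_ (mem_le_foldl_max _ 0 _ hkK)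
        rw [hcand]; exact hWle
      · have hc0 : s.count (v - 1) = 0 :=
          List.count_eq_zero_of_not_mem (fun h => hvm ((hmem _).mp h))
        have hvnums : v ∈ nums := (hmem v).mp (List.getElem_mem hi)
        have hkK : candF C v ∈ K.map (candF C) :=
          List.mem_map.mpr ⟨v, by rw [hK]; exact (PySem.Set.mem_ofList _ _).mpr hvnums, rfl⟩
        have hcand : candF C v = (s.count v : Int) + (s.count (v + 1) : Int) := by
          rw [hC, candF_count, hcnt, hcnt]
        refine le_trans ?_ (mem_le_foldl_max _ 0 _ hkK)
        rw [hcand]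
        have : (0 : Int) ≤ (s.count (v + 1) : Int) := by positivity
        omega
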